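-- pv_equiv track=rewrite | github.com/ccstudentcc/cpa-warden-windows-auto-maintain | cwma/auto/state/upload_queue.py | coalesce_upload_snapshot_rows
-- ===== SOURCE A (Python) =====
-- def parse_upload_snapshot_row(row: str) -> tuple[str, int, int] | None:
--     parts = row.rsplit("|", 2)
--     if len(parts) != 3:
--         return None
--     path, size_text, mtime_text = parts
--     try:
--         size = int(size_text)
--         mtime_ns = int(mtime_text)
--     except ValueError:
--         return None
--     return path, size, mtime_ns
--
-- def coalesce_upload_snapshot_rows(rows: list[str]) -> list[str]:
--     merged_rows: list[str] = []
--     path_to_index: dict[str, int] = {}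
--     raw_row_to_index: dict[str, int] = {}
--     for row in rows:
--         parsed = parse_upload_snapshot_row(row)
--         if parsed is None:
--             existing = raw_row_to_index.get(row)
--             if existing is None:
--                 raw_row_to_index[row] = len(merged_rows)
--                 merged_rows.append(row)
--                 continue
--             merged_rows[existing] = row
--             continue
--
--         path = parsed[0]
--         existing = path_to_index.get(path)
--         if existing is None:
--             path_to_index[path] = len(merged_rows)
--             merged_rows.append(row)
--             continue
--         # Last-writer-wins for the same path to avoid stale duplicate versions in pending queue.
--         merged_rows[existing] = row
--     return merged_rows
-- ===== SOURCE B (Python) =====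
-- def parse_upload_snapshot_row(row: str):
--     parts = row.rsplit("|", 2)
--     if len(parts) != 3:
--         return None
--     path, size_text, mtime_text = parts
--     try:
--         size = int(size_text)
--         mtime_ns = int(mtime_text)
--     except ValueError:
--         return None
--     return path, size, mtime_ns
--
-- def _row_key(row: str):
--     # parseable rows are keyed by path, unparseable ones by their full text;
--     # the namespace tag keeps the two kinds apart even when they coincide textually
--     parsed = parse_upload_snapshot_row(row)
--     return ("p", parsed[0]) if parsed is not None else ("r", row)
--
-- def coalesce_upload_snapshot_rows(rows: list[str]) -> list[str]:
--     # Staged passes instead of A's in-place index bookkeeping: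
--     # pass 1 scans from the RIGHT keeping the first row seen per key (= last writer);
--     # pass 2 scans forward emitting that winner at each key's first appearance.
--     winner = {}
--     for row in reversed(rows):
--         k = _row_key(row)
--         if k not in winner:
--             winner[k] = row
--     out = []
--     emitted = set()
--     for row in rows:
--         k = _row_key(row)
--         if k not in emitted:
--             emitted.add(k)
--             out.append(winner[k])
--     return out
-- ===== Notes on version B (the rewrite author's own statement) =====
-- stated objective: alternative
-- what changed: Replaces A's single in-place pass (result list mutated through two index dicts) with two staged scans: a reverse scan that keeps the first row seen per namespaced key (the last writer), then a forward scan emitting that winner at each key's first appearance.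
import Mathlib
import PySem

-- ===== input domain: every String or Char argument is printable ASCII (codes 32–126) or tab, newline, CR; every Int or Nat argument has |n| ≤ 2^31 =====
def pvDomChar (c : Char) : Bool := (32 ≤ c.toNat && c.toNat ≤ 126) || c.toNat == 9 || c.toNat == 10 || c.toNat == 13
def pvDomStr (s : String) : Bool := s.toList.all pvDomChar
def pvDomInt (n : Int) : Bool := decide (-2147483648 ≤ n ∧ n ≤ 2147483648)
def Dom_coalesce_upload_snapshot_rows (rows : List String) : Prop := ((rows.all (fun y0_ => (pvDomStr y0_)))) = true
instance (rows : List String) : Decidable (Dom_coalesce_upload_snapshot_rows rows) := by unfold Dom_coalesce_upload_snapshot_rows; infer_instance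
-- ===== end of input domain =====

-- B replaces A's single in-place pass (result list mutated through two index dicts) by two
-- staged scans: a reverse scan keeping the first row seen per namespaced key (= the last
-- writer), then a forward scan emitting that winner at each key's first appearance
-- (objective: alternative).

-- ===== PORT A =====
-- row.rsplit("|", 2): exact for the single-character separator "|" — a full split,
-- with all but the last two pieces rejoined by "|".
def pvRsplit2Bar (s : String) : List String :=
  let pieces := (PySem.Str.split? s "|").getD []
  if pieces.length ≤ 3 then pieces
  else PySem.Str.join "|" (pieces.take (pieces.length - 2)) :: pieces.drop (pieces.length - 2)

-- helper parse_upload_snapshot_row, identical in Source A and Source B (shared by both ports)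
def parse_upload_snapshot_row (row : String) : Option (String × Int × Int) :=
  match pvRsplit2Bar row with
  | [path, size_text, mtime_text] =>
    match PySem.Int.ofStr? size_text, PySem.Int.ofStr? mtime_text with
    | some size, some mtime_ns => some (path, size, mtime_ns)
    | _, _ => none
  | _ => none

-- loop body of A: state = (merged_rows, path_to_index, raw_row_to_index)
def pvStepA (st : List String × PySem.Dict String Int × PySem.Dict String Int)
    (row : String) : List String × PySem.Dict String Int × PySem.Dict String Int :=
  let (merged, pIdx, rIdx) := st
  match parse_upload_snapshot_row row with
  | none =>
    match rIdx.get? row with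
    | none => (merged ++ [row], pIdx, rIdx.insert row (PySem.List.len merged))
    | some existing => (PySem.List.pySetD merged existing row, pIdx, rIdx)
  | some parsed =>
    match pIdx.get? parsed.1 with
    | none => (merged ++ [row], pIdx.insert parsed.1 (PySem.List.len merged), rIdx)
    | some existing => (PySem.List.pySetD merged existing row, pIdx, rIdx)

def coalesce_upload_snapshot_rows (rows : List String) : List String :=
  (rows.foldl pvStepA ([], PySem.Dict.empty, PySem.Dict.empty)).1

-- ===== PORT B =====
-- _row_key: ("p", path) for parseable rows, ("r", row) otherwise (Bool true = "p")
def pvKeyB (row : String) : Bool × String :=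
  match parse_upload_snapshot_row row with
  | some parsed => (true, parsed.1)
  | none => (false, row)

-- pass 1 body: keep the first row seen (scanning rows reversed) per key
def pvWinStep (d : PySem.Dict (Bool × String) String) (row : String) :
    PySem.Dict (Bool × String) String :=
  let k := pvKeyB row
  if d.contains k then d else d.insert k row

-- pass 2 body: state = (emitted, out); emit the winner at each key's first appearance
def pvEmitStep (win : PySem.Dict (Bool × String) String)
    (st : PySem.Set (Bool × String) × List String) (row : String) :
    PySem.Set (Bool × String) × List String :=
  let k := pvKeyB row
  if st.1.contains k then st
  else (PySem.Set.add st.1 k, st.2 ++ [win.getD k ""])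

def coalesce_upload_snapshot_rows_alt (rows : List String) : List String :=
  let win := rows.reverse.foldl pvWinStep PySem.Dict.empty
  (rows.foldl (pvEmitStep win) (PySem.Set.empty, [])).2

-- ===== PRECONDITION & SPEC =====
def Spec_coalesce_upload_snapshot_rows (rows : List String) (out : List String) : Prop := out = coalesce_upload_snapshot_rows_alt rows
instance (rows : List String) (out : List String) : Decidable (Spec_coalesce_upload_snapshot_rows rows out) := by unfold Spec_coalesce_upload_snapshot_rows; infer_instance

-- ===== CLAIM (what is proved, stated in full; the proofs are below) =====
def Claim_equal_coalesce_upload_snapshot_rows : Prop := ∀ (rows : List String), Dom_coalesce_upload_snapshot_rows rows → Spec_coalesce_upload_snapshot_rows rows (coalesce_upload_snapshot_rows rows)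

-- ===== LEMMAS AND PROOFS =====

-- first occurrences of a key list, in order
def pvFirsts {α : Type} [DecidableEq α] : List α → List α
  | [] => []
  | x :: xs => x :: (pvFirsts xs).filter (· ≠ x)

theorem mem_pvFirsts {α : Type} [DecidableEq α] (l : List α) (k : α) :
    k ∈ pvFirsts l ↔ k ∈ l := by
  induction l with
  | nil => simp [pvFirsts]
  | cons x xs ih =>
    by_cases h : k = x <;> simp [pvFirsts, h, ih]

theorem nodup_pvFirsts {α : Type} [DecidableEq α] (l : List α) : (pvFirsts l).Nodup := by
  induction l with
  | nil => simp [pvFirsts]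
  | cons x xs ih =>
    refine List.Nodup.cons (fun h => ?_) (ih.filter _)
    simp at h

theorem pvFirsts_snoc {α : Type} [DecidableEq α] (l : List α) (x : α) :
    pvFirsts (l ++ [x]) = if x ∈ l then pvFirsts l else pvFirsts l ++ [x] := by
  induction l with
  | nil => simp [pvFirsts]
  | cons y ys ih =>
    by_cases hx : x ∈ ys
    · simp [pvFirsts, ih, hx]
    · by_cases hxy : x = y
      · subst hxy
        simp [pvFirsts, ih, hx, List.filter_append]
      · simp [pvFirsts, ih, hx, hxy, List.filter_append]

-- the last row of p whose key is k (first match scanning the reversal)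
def pvLastRow (p : List String) (k : Bool × String) : Option String :=
  p.reverse.find? (fun r => decide (pvKeyB r = k))

theorem pvLastRow_snoc (p : List String) (r : String) (k : Bool × String) :
    pvLastRow (p ++ [r]) k = if pvKeyB r = k then some r else pvLastRow p k := by
  simp [pvLastRow, List.find?]
  split_ifs with h <;> simp [h]

theorem pvLastRow_cons (p : List String) (r : String) (k : Bool × String) :
    pvLastRow (r :: p) k =
      (pvLastRow p k).or (if pvKeyB r = k then some r else none) := by
  simp only [pvLastRow, List.reverse_cons, List.find?_append]
  rcases h : List.find? (fun r => decide (pvKeyB r = k)) p.reverse with _ | v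
  · simp [List.find?]
    split_ifs with hk <;> simp [hk]
  · simp

-- position of the first occurrence of k in l (none if absent)
def pvIdx {α : Type} [DecidableEq α] (l : List α) (k : α) : Option Nat :=
  match l with
  | [] => none
  | x :: xs => if x = k then some 0 else (pvIdx xs k).map (· + 1)

theorem pvIdx_eq_none_iff {α : Type} [DecidableEq α] (l : List α) (k : α) :
    pvIdx l k = none ↔ k ∉ l := by
  induction l with
  | nil => simp [pvIdx]
  | cons x xs ih =>
    by_cases h : x = k <;> simp [pvIdx, h, ih, eq_comm (a := k)]

theorem pvIdx_mem_of_eq_some {α : Type} [DecidableEq α] {l : List α} {k : α} {n : Nat}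
    (h : pvIdx l k = some n) : k ∈ l := by
  by_contra hk
  rw [← pvIdx_eq_none_iff l k] at hk
  simp [hk] at h

theorem pvIdx_append_self {α : Type} [DecidableEq α] {l : List α} {k : α}
    (h : k ∉ l) : pvIdx (l ++ [k]) k = some l.length := by
  induction l with
  | nil => simp [pvIdx]
  | cons x xs ih =>
    simp only [List.mem_cons, not_or] at h
    simp [pvIdx, Ne.symm h.1, ih h.2]

theorem pvIdx_append_of_ne {α : Type} [DecidableEq α] (l : List α) {k k' : α}
    (h : k' ≠ k) : pvIdx (l ++ [k]) k' = pvIdx l k' := by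
  induction l with
  | nil => simp [pvIdx, Ne.symm h]
  | cons x xs ih =>
    by_cases hx : x = k' <;> simp [pvIdx, hx, ih]

theorem pvMap_ite_eq_set {α β : Type} [DecidableEq α] {l : List α} {k : α} {n : Nat}
    (hnd : l.Nodup) (hidx : pvIdx l k = some n) (f : α → β) (v : β) :
    l.map (fun x => if x = k then v else f x) = (l.map f).set n v := by
  induction l generalizing n with
  | nil => simp [pvIdx] at hidx
  | cons x xs ih =>
    simp only [List.nodup_cons] at hnd
    by_cases hx : x = k
    · simp only [pvIdx, if_pos hx, Option.some.injEq] at hidx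
      subst hidx; subst hx
      simp only [List.map_cons, List.set_cons_zero, List.cons.injEq]
      refine ⟨by simp, ?_⟩
      apply List.map_congr_left
      intro a ha
      rw [if_neg]; exact fun h => hnd.1 (h ▸ ha)
    · simp only [pvIdx, if_neg hx, Option.map_eq_some_iff] at hidx
      obtain ⟨m, hm, rfl⟩ := hidx
      simp [hx, ih hnd.2 hm]

-- ---------- A equals the characterization: first-appearance keys, last row per key ----------

-- abbreviation used throughout: the first-appearance key order of a prefix p
def pvOrd (p : List String) : List (Bool × String) := pvFirsts (p.map pvKeyB)

def pvInvA (p : List String)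
    (st : List String × PySem.Dict String Int × PySem.Dict String Int) : Prop :=
  st.1 = (pvOrd p).map (fun k => (pvLastRow p k).getD "") ∧
  (∀ q : String, st.2.1.get? q = (pvIdx (pvOrd p) (true, q)).map Int.ofNat) ∧
  (∀ q : String, st.2.2.get? q = (pvIdx (pvOrd p) (false, q)).map Int.ofNat)

theorem pvInvA_step (p : List String)
    (merged : List String) (pIdx rIdx : PySem.Dict String Int)
    (h : pvInvA p (merged, pIdx, rIdx)) (row : String) :
    pvInvA (p ++ [row]) (pvStepA (merged, pIdx, rIdx) row) := by
  obtain ⟨hm', hp', hr'⟩ := h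
  have hm : merged = (pvOrd p).map (fun k => (pvLastRow p k).getD "") := hm'
  have hp : ∀ q : String, pIdx.get? q = (pvIdx (pvOrd p) (true, q)).map Int.ofNat := hp'
  have hr : ∀ q : String, rIdx.get? q = (pvIdx (pvOrd p) (false, q)).map Int.ofNat := hr'
  have hofn : ∀ n : Nat, Int.ofNat n = (n : Int) := fun _ => rfl
  have hlen : PySem.List.len merged = Int.ofNat (pvOrd p).length := by
    rw [PySem.List.len_eq, hm, List.length_map]
    rfl
  -- shared facts for any key 'key' with pvKeyB row = key
  have fresh1 : ∀ key : Bool × String, pvKeyB row = key → key ∉ pvOrd p →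
      merged ++ [row] =
        (pvOrd (p ++ [row])).map (fun k => (pvLastRow (p ++ [row]) k).getD "") ∧
      pvOrd (p ++ [row]) = pvOrd p ++ [key] := by
    intro key hkey hnot
    have hnotm : key ∉ p.map pvKeyB := by rwa [pvOrd, mem_pvFirsts] at hnot
    have hord : pvOrd (p ++ [row]) = pvOrd p ++ [key] := by
      simp only [pvOrd, List.map_append, List.map_singleton, hkey]
      rw [pvFirsts_snoc, if_neg hnotm]
    refine ⟨?_, hord⟩
    rw [hord, List.map_append]
    congr 1
    · rw [hm]
      apply List.map_congr_left
      intro a ha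
      rw [pvLastRow_snoc, if_neg]
      intro hcontra
      exact hnot (by rw [hkey.symm.trans hcontra]; exact ha)
    · simp [pvLastRow_snoc, hkey]
  have exist1 : ∀ (key : Bool × String) (n : Nat), pvKeyB row = key →
      pvIdx (pvOrd p) key = some n →
      PySem.List.pySetD merged (Int.ofNat n) row =
        (pvOrd (p ++ [row])).map (fun k => (pvLastRow (p ++ [row]) k).getD "") ∧
      pvOrd (p ++ [row]) = pvOrd p := by
    intro key n hkey hn
    have hmem := pvIdx_mem_of_eq_some hn
    have hmemm : key ∈ p.map pvKeyB := by rwa [pvOrd, mem_pvFirsts] at hmem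
    have hord : pvOrd (p ++ [row]) = pvOrd p := by
      simp only [pvOrd, List.map_append, List.map_singleton, hkey]
      rw [pvFirsts_snoc, if_pos hmemm]
    refine ⟨?_, hord⟩
    rw [hord, hm, hofn n, PySem.List.pySetD_natCast,
      ← pvMap_ite_eq_set (show (pvOrd p).Nodup from nodup_pvFirsts _) hn
        (fun k => (pvLastRow p k).getD "") row]
    apply List.map_congr_left
    intro a _
    rw [pvLastRow_snoc, hkey]
    by_cases ha : a = key
    · simp [ha]
    · rw [if_neg ha, if_neg (fun h => ha h.symm)]
  rcases hparse : parse_upload_snapshot_row row with _ | parsed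
  · -- unparseable row: key = (false, row), A consults rIdx
    have hkey : pvKeyB row = (false, row) := by simp [pvKeyB, hparse]
    rcases hgp : rIdx.get? row with _ | ex
    · rw [hr row, Option.map_eq_none_iff, pvIdx_eq_none_iff] at hgp
      obtain ⟨h1, hord⟩ := fresh1 _ hkey hgp
      simp only [pvStepA, hparse, hr row,
        (pvIdx_eq_none_iff (pvOrd p) (false, row)).mpr hgp, Option.map_none]
      refine ⟨h1, ?_, ?_⟩
      · intro q
        rw [hp q, hord, pvIdx_append_of_ne]
        simp
      · intro q
        rw [PySem.Dict.get?_insert, hord]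
        by_cases hq : q = row
        · subst hq
          rw [if_pos rfl, pvIdx_append_self hgp, hlen]
          rfl
        · rw [if_neg hq, hr q, pvIdx_append_of_ne]
          simp [hq]
    · rw [hr row, Option.map_eq_some_iff] at hgp
      obtain ⟨n, hn, rfl⟩ := hgp
      obtain ⟨h1, hord⟩ := exist1 _ n hkey hn
      simp only [pvStepA, hparse, hr row, hn, Option.map_some]
      exact ⟨h1, fun q => hord ▸ hp q, fun q => hord ▸ hr q⟩
  · -- parseable row: key = (true, parsed.1), A consults pIdx
    have hkey : pvKeyB row = (true, parsed.1) := by simp [pvKeyB, hparse]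
    rcases hgp : pIdx.get? parsed.1 with _ | ex
    · rw [hp parsed.1, Option.map_eq_none_iff, pvIdx_eq_none_iff] at hgp
      obtain ⟨h1, hord⟩ := fresh1 _ hkey hgp
      simp only [pvStepA, hparse, hp parsed.1,
        (pvIdx_eq_none_iff (pvOrd p) (true, parsed.1)).mpr hgp, Option.map_none]
      refine ⟨h1, ?_, ?_⟩
      · intro q
        rw [PySem.Dict.get?_insert, hord]
        by_cases hq : q = parsed.1
        · subst hq
          rw [if_pos rfl, pvIdx_append_self hgp, hlen]
          rfl
        · rw [if_neg hq, hp q, pvIdx_append_of_ne]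
          simp [hq]
      · intro q
        rw [hr q, hord, pvIdx_append_of_ne]
        simp
    · rw [hp parsed.1, Option.map_eq_some_iff] at hgp
      obtain ⟨n, hn, rfl⟩ := hgp
      obtain ⟨h1, hord⟩ := exist1 _ n hkey hn
      simp only [pvStepA, hparse, hp parsed.1, hn, Option.map_some]
      exact ⟨h1, fun q => hord ▸ hp q, fun q => hord ▸ hr q⟩

theorem pvFoldA (rest : List String) :
    ∀ (p : List String) (st : List String × PySem.Dict String Int × PySem.Dict String Int),
      pvInvA p st → pvInvA (p ++ rest) (rest.foldl pvStepA st) := by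
  induction rest with
  | nil => intro p st h; simpa using h
  | cons row rest' ih =>
    intro p st h
    obtain ⟨merged, pIdx, rIdx⟩ := st
    have h' := pvInvA_step p merged pIdx rIdx h row
    have := ih (p ++ [row]) _ h'
    simpa using this

theorem A_char (rows : List String) :
    coalesce_upload_snapshot_rows rows =
      (pvOrd rows).map (fun k => (pvLastRow rows k).getD "") := by
  have h0 : pvInvA [] ([], PySem.Dict.empty, PySem.Dict.empty) := by
    refine ⟨rfl, ?_, ?_⟩ <;> intro q <;> rfl
  have := pvFoldA rows [] _ h0
  simpa [coalesce_upload_snapshot_rows] using this.1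

-- ---------- B's pass 1 computes pvLastRow ----------

theorem pvWin_char (rows : List String) :
    ∀ k : Bool × String,
      (rows.reverse.foldl pvWinStep PySem.Dict.empty).get? k = pvLastRow rows k := by
  induction rows with
  | nil => intro k; rfl
  | cons r rest ih =>
    intro k
    have hfold : (r :: rest).reverse.foldl pvWinStep PySem.Dict.empty =
        pvWinStep (rest.reverse.foldl pvWinStep PySem.Dict.empty) r := by
      rw [List.reverse_cons, List.foldl_append]
      rfl
    rw [hfold, pvLastRow_cons, pvWinStep]
    set d := rest.reverse.foldl pvWinStep PySem.Dict.empty with hd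
    rcases hc : d.contains (pvKeyB r) with _ | _
    · -- key of r unseen in rest: insert
      have hnone : pvLastRow rest (pvKeyB r) = none := by
        have := (PySem.Dict.contains_eq_isSome_get? d (pvKeyB r)).symm.trans hc
        rw [ih (pvKeyB r)] at this
        exact Option.eq_none_iff_forall_ne_some.mpr (fun v hv => by simp [hv] at this)
      simp only [if_false, Bool.false_eq_true]
      rw [PySem.Dict.get?_insert]
      by_cases hk : k = pvKeyB r
      · subst hk
        simp [hnone]
      · rw [if_neg hk, ih k]
        rcases hlast : pvLastRow rest k with _ | v
        · simp [Ne.symm hk]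
        · simp
    · -- key of r already present (r is not the last writer for it)
      have hsome : (pvLastRow rest (pvKeyB r)).isSome = true := by
        have := (PySem.Dict.contains_eq_isSome_get? d (pvKeyB r)).symm.trans hc
        rwa [ih (pvKeyB r)] at this
      simp only [if_true]
      rw [ih k]
      rcases hlast : pvLastRow rest k with _ | v
      · have hne : pvKeyB r ≠ k := by
          intro h
          rw [h, hlast] at hsome
          simp at hsome
        simp [hne]
      · simp

-- ---------- B's pass 2 emits in first-appearance order ----------

def pvInvB (win : PySem.Dict (Bool × String) String) (p : List String)
    (st : PySem.Set (Bool × String) × List String) : Prop :=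
  (∀ k : Bool × String, k ∈ st.1 ↔ k ∈ p.map pvKeyB) ∧
  st.2 = (pvOrd p).map (fun k => win.getD k "")

theorem pvFoldB (win : PySem.Dict (Bool × String) String) (rest : List String) :
    ∀ (p : List String) (st : PySem.Set (Bool × String) × List String),
      pvInvB win p st → pvInvB win (p ++ rest) (rest.foldl (pvEmitStep win) st) := by
  induction rest with
  | nil => intro p st h; simpa using h
  | cons row rest' ih =>
    intro p st h
    obtain ⟨hmem, hout⟩ := h
    have hstep : pvInvB win (p ++ [row]) (pvEmitStep win st row) := by
      rcases hc : st.1.contains (pvKeyB row) with _ | _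
      · -- fresh key: record and emit the winner
        have hnot : pvKeyB row ∉ p.map pvKeyB := by
          rw [← hmem]
          intro hmem'
          rw [show st.1.contains (pvKeyB row) = true from List.elem_eq_true_of_mem hmem'] at hc
          cases hc
        have hord : pvOrd (p ++ [row]) = pvOrd p ++ [pvKeyB row] := by
          simp only [pvOrd, List.map_append, List.map_singleton]
          rw [pvFirsts_snoc, if_neg hnot]
        constructor
        · intro k
          simp only [pvEmitStep, hc, Bool.false_eq_true, if_false,
            PySem.Set.mem_add, hmem, List.map_append]
          simp [or_comm]
        · simp only [pvEmitStep, hc, Bool.false_eq_true, if_false, hord,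
            List.map_append, hout, List.map_singleton]
      · -- seen key: skip
        have hmem' : pvKeyB row ∈ p.map pvKeyB := by
          rw [← hmem]
          exact List.mem_of_elem_eq_true hc
        have hord : pvOrd (p ++ [row]) = pvOrd p := by
          simp only [pvOrd, List.map_append, List.map_singleton]
          rw [pvFirsts_snoc, if_pos hmem']
        constructor
        · intro k
          simp only [pvEmitStep, hc, if_true, hmem, List.map_append, List.map_singleton,
            List.mem_append, List.mem_singleton]
          constructor
          · exact Or.inl
          · rintro (h | rfl)
            · exact h
            · exact hmem'
        · simp only [pvEmitStep, hord]
          rw [if_pos hc]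
          exact hout
    have := ih (p ++ [row]) _ hstep
    simpa using this

theorem B_char (rows : List String) :
    coalesce_upload_snapshot_rows_alt rows =
      (pvOrd rows).map
        (fun k => ((rows.reverse.foldl pvWinStep PySem.Dict.empty).getD k "")) := by
  have h0 : pvInvB (rows.reverse.foldl pvWinStep PySem.Dict.empty) []
      (PySem.Set.empty, []) := by
    constructor
    · intro k; simp [PySem.Set.empty]
    · rfl
  have := pvFoldB (rows.reverse.foldl pvWinStep PySem.Dict.empty) rows [] _ h0
  simpa [coalesce_upload_snapshot_rows_alt] using this.2

-- ===== VERDICT (by name: the statement is the Claim_ definition above) =====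
theorem coalesce_upload_snapshot_rows_spec : Claim_equal_coalesce_upload_snapshot_rows := by
  intro rows _
  show _ = _
  rw [A_char, B_char]
  apply List.map_congr_left
  intro k _
  rw [PySem.Dict.getD_eq_get?_getD, pvWin_char rows k]
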